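-- pv_equiv track=rewrite | github.com/pppop00/VRM-Soccer | soccer_bev_pipeline.py | _stabilize_label_sequence
-- ===== SOURCE A (Python) =====
-- from typing import Any, Callable, Iterable, Optional
--
-- def _stabilize_label_sequence(
--     labels: list[Optional[str]],
--     min_run_frames: int,
-- ) -> list[Optional[str]]:
--     if min_run_frames <= 1 or len(labels) <= 1:
--         return list(labels)
--
--     stable = list(labels)
--     for _ in range(2):
--         run_start = 0
--         for idx in range(1, len(stable) + 1):
--             if idx < len(stable) and stable[idx] == stable[run_start]:
--                 continue
--
--             run_value = stable[run_start]
--             run_len = idx - run_start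
--             if run_len < min_run_frames:
--                 prev_value = stable[run_start - 1] if run_start > 0 else None
--                 next_value = stable[idx] if idx < len(stable) else None
--
--                 replacement = None
--                 if prev_value == next_value and prev_value is not None:
--                     replacement = prev_value
--                 elif prev_value is not None:
--                     replacement = prev_value
--                 elif next_value is not None:
--                     replacement = next_value
--
--                 if replacement is not None:
--                     for j in range(run_start, idx):
--                         stable[j] = replacement
--
--             run_start = idx
--     return stable
-- ===== SOURCE B (Python) =====
-- from typing import Optional
--
-- def _stabilize_label_sequence(
--     labels: list,
--     min_run_frames: int,
-- ) -> list:
--     if min_run_frames <= 1 or len(labels) <= 1: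
--         return list(labels)
--
--     # run-length encode the sequence once
--     runs = []
--     i, n = 0, len(labels)
--     while i < n:
--         j = i + 1
--         while j < n and labels[j] == labels[i]:
--             j += 1
--         runs.append((labels[i], j - i))
--         i = j
--
--     for _ in range(2):
--         # smooth short runs at the (value, count) pair level
--         smoothed = []
--         prev = None
--         for k in range(len(runs)):
--             v, c = runs[k]
--             if c < min_run_frames:
--                 nxt = runs[k + 1][0] if k + 1 < len(runs) else None
--                 r = prev if prev is not None else nxt
--                 if r is not None:
--                     v = r
--             smoothed.append((v, c))
--             prev = v
--         # merge adjacent pairs that now carry the same value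
--         runs = []
--         k, m = 0, len(smoothed)
--         while k < m:
--             v, c = smoothed[k]
--             k += 1
--             while k < m and smoothed[k][0] == v:
--                 c += smoothed[k][1]
--                 k += 1
--             runs.append((v, c))
--
--     return [v for v, c in runs for _ in range(c)]
-- ===== Notes on version B (the rewrite author's own statement) =====
-- stated objective: alternative
-- what changed: B works on a run-length encoding: it encodes the labels once into (value,count) pairs, performs each of the two smoothing passes as a rewrite of the pair list followed by merging adjacent equal-valued pairs, and decodes back to labels once at the end; A scans element indices and overwrites short runs in place in the label array.
import Mathlib
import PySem

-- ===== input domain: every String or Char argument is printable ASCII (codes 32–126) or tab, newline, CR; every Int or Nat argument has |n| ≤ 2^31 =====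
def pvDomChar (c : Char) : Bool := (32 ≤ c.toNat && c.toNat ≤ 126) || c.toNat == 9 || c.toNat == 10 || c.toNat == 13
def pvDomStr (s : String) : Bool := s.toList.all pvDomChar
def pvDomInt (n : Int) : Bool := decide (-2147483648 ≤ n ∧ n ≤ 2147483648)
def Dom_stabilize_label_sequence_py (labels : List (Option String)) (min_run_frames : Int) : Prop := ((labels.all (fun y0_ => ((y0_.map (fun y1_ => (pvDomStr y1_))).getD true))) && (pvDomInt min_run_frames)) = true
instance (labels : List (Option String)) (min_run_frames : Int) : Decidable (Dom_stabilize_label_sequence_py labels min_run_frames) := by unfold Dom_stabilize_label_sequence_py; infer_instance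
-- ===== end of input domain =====

-- B replaces A's in-place index-scanning smoother by a run-length-encoding pipeline:
-- encode once to (value,count) pairs, smooth and merge the pair list twice, decode once
-- (objective: alternative representation, same results).

-- ===== PORT A =====
-- body of A's inner `for idx in range(1, len(stable) + 1)` loop; state = (stable, run_start)
def pvStepA (min_run_frames : Int) (st : List (Option String) × Int) (idx : Int) : List (Option String) × Int :=
  let stable := st.1
  let run_start := st.2
  if idx < PySem.List.len stable ∧ PySem.List.pyGetD stable idx none = PySem.List.pyGetD stable run_start none then
    st
  else
    let run_len := idx - run_start
    let stable' :=
      if run_len < min_run_frames then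
        let prev_value := if run_start > 0 then PySem.List.pyGetD stable (run_start - 1) none else none
        let next_value := if idx < PySem.List.len stable then PySem.List.pyGetD stable idx none else none
        let replacement :=
          if prev_value = next_value ∧ prev_value ≠ none then prev_value
          else if prev_value ≠ none then prev_value
          else if next_value ≠ none then next_value
          else (none : Option String)
        if replacement ≠ none then
          (PySem.List.pyRange run_start idx 1).foldl (fun s j => PySem.List.pySetD s j replacement) stable
        else stable
      else stable
    (stable', idx)

-- one iteration of A's outer `for _ in range(2)` loop
def pvPassA (min_run_frames : Int) (stable : List (Option String)) : List (Option String) :=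
  ((PySem.List.pyRange 1 (PySem.List.len stable + 1) 1).foldl (pvStepA min_run_frames) (stable, 0)).1

def stabilize_label_sequence_py (labels : List (Option String)) (min_run_frames : Int) : List (Option String) :=
  if min_run_frames ≤ 1 ∨ PySem.List.len labels ≤ 1 then labels
  else (PySem.List.pyRange 0 2 1).foldl (fun stable _ => pvPassA min_run_frames stable) labels

-- ===== PORT B =====
-- Source B's run-length encoder: the outer while loop = structural recursion on the suffix,
-- the inner `while j < n and labels[j] == labels[i]` scan = takeWhile/dropWhile
def pvEncode (l : List (Option String)) : List (Option String × Nat) :=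
  match l with
  | [] => []
  | x :: xs =>
    (x, (xs.takeWhile (fun y => y == x)).length + 1) :: pvEncode (xs.dropWhile (fun y => y == x))
termination_by l.length
decreasing_by
  simp only [List.length_cons]
  exact Nat.lt_succ_of_le (List.length_dropWhile_le _ _)

-- `runs[k+1][0] if k+1 < len(runs) else None`, phrased on the remaining suffix of pairs
def pvNextVal (r : List (Option String × Nat)) : Option String :=
  match r with | [] => none | (w, _) :: _ => w

-- Source B's smoothing loop over the pair list; prev = previously emitted value
def pvSmoothR (min_run_frames : Int) (prev : Option String) : List (Option String × Nat) → List (Option String × Nat)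
  | [] => []
  | (v, c) :: rest =>
    let v' :=
      if (c : Int) < min_run_frames then
        let nxt := pvNextVal rest
        let r := if prev ≠ none then prev else nxt
        if r ≠ none then r else v
      else v
    (v', c) :: pvSmoothR min_run_frames v' rest

-- Source B's merge loop: sum the counts of the following pairs carrying the same value
def pvMerge : List (Option String × Nat) → List (Option String × Nat)
  | [] => []
  | (v, c) :: rest =>
    (v, c + ((rest.takeWhile (fun p => p.1 == v)).map Prod.snd).sum)
      :: pvMerge (rest.dropWhile (fun p => p.1 == v))
termination_by r => r.length
decreasing_by
  simp only [List.length_cons]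
  exact Nat.lt_succ_of_le (List.length_dropWhile_le _ _)

-- `[v for v, c in runs for _ in range(c)]`
def pvDecode (r : List (Option String × Nat)) : List (Option String) :=
  r.flatMap (fun p => List.replicate p.2 p.1)

def stabilize_label_sequence_py_alt (labels : List (Option String)) (min_run_frames : Int) : List (Option String) :=
  if min_run_frames ≤ 1 ∨ PySem.List.len labels ≤ 1 then labels
  else pvDecode ((PySem.List.pyRange 0 2 1).foldl
    (fun runs _ => pvMerge (pvSmoothR min_run_frames none runs)) (pvEncode labels))

-- ===== PRECONDITION & SPEC =====
def Spec_stabilize_label_sequence_py (labels : List (Option String)) (min_run_frames : Int) (out : List (Option String)) : Prop := out = stabilize_label_sequence_py_alt labels min_run_frames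
instance (labels : List (Option String)) (min_run_frames : Int) (out : List (Option String)) : Decidable (Spec_stabilize_label_sequence_py labels min_run_frames out) := by unfold Spec_stabilize_label_sequence_py; infer_instance

-- ===== CLAIM (what is proved, stated in full; the proofs are below) =====
def Claim_equal_stabilize_label_sequence_py : Prop := ∀ (labels : List (Option String)) (min_run_frames : Int), Dom_stabilize_label_sequence_py labels min_run_frames → Spec_stabilize_label_sequence_py labels min_run_frames (stabilize_label_sequence_py labels min_run_frames)

-- ===== LEMMAS AND PROOFS =====

-- proof-side element-level description of one smoothing pass, used to connect both ports
def pvHeadN (l : List (Option String)) : Option String :=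
  match l with | [] => none | y :: _ => y

def pvSmoothPass (min_run_frames : Int) (prev : Option String) (seq : List (Option String)) : List (Option String) :=
  match seq with
  | [] => []
  | x :: xs =>
    let run := xs.takeWhile (fun y => y == x)
    let rest := xs.dropWhile (fun y => y == x)
    let val :=
      if ((run.length : Int) + 1) < min_run_frames then
        let nxt := pvHeadN rest
        let repl := if prev ≠ none then prev else nxt
        if repl ≠ none then repl else x
      else x
    List.replicate (run.length + 1) val ++ pvSmoothPass min_run_frames val rest
termination_by seq.length
decreasing_by
  simp only [List.length_cons]
  exact Nat.lt_succ_of_le (List.length_dropWhile_le _ _)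

lemma pvFoldlFixed {α β : Type} (f : α → β → α) (st : α) (l : List β)
    (h : ∀ x ∈ l, f st x = st) : l.foldl f st = st := by
  induction l with
  | nil => rfl
  | cons a t ih =>
    simp only [List.foldl_cons, h a (by simp)]
    exact ih (fun x hx => h x (by simp [hx]))

lemma pvGetDAppendRight (out suf : List (Option String)) (k : Nat) (d : Option String) :
    (out ++ suf).getD (out.length + k) d = suf.getD k d := by
  simp [List.getD]
  rw [List.getElem?_append_right (by omega)]
  simp

lemma pvSkipFold (min_run_frames : Int) (x : Option String) (run out rest : List (Option String))
    (hrun : ∀ y ∈ run, y = x) :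
    (PySem.List.pyRange ((out.length : Int) + 1) ((out.length : Int) + (run.length : Int) + 1) 1).foldl
      (pvStepA min_run_frames) (out ++ x :: (run ++ rest), (out.length : Int))
    = (out ++ x :: (run ++ rest), (out.length : Int)) := by
  apply pvFoldlFixed
  intro idx hidx
  rw [PySem.List.mem_pyRange_one] at hidx
  have hlen : (out ++ x :: (run ++ rest)).length = out.length + (run.length + rest.length + 1) := by
    simp
  have h0 : (0:Int) ≤ idx := by omega
  have hltn : idx < ((out ++ x :: (run ++ rest)).length : Int) := by rw [hlen]; push_cast; omega
  have hx_p : PySem.List.pyGetD (out ++ x :: (run ++ rest)) ((out.length : Int)) none = x := by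
    rw [PySem.List.pyGetD_natCast]
    simpa using pvGetDAppendRight out (x :: (run ++ rest)) 0 none
  have hx_at : PySem.List.pyGetD (out ++ x :: (run ++ rest)) idx none = x := by
    rw [PySem.List.pyGetD_eq_getElem _ _ h0 hltn]
    obtain ⟨k', hk'⟩ : ∃ k', idx.toNat - out.length = k' + 1 := ⟨idx.toNat - out.length - 1, by omega⟩
    rw [List.getElem_append_right (by omega)]
    have hk'lt : k' < run.length := by omega
    simp only [hk']
    rw [List.getElem_cons_succ, List.getElem_append_left hk'lt]
    exact hrun _ (List.getElem_mem _)
  unfold pvStepA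
  rw [if_pos ⟨by simpa [PySem.List.len_eq] using hltn, by rw [hx_at, hx_p]⟩]

lemma pvLastIdx (out t : List (Option String)) (h : out ≠ []) :
    PySem.List.pyGetD (out ++ t) ((out.length : Int) - 1) none = out.getLast?.getD none := by
  have h0 : 0 < out.length := List.length_pos_iff.mpr h
  rw [PySem.List.pyGetD_eq_getElem _ _ (by omega) (by simp)]
  rw [List.getElem_append_left (by omega)]
  rw [List.getLast?_eq_some_getLast h, Option.getD_some]
  rw [List.getLast_eq_getElem]
  congr 1
  omega

lemma pvCollapse (p q : Option String) :
    (if p = q ∧ p ≠ none then p else if p ≠ none then p else if q ≠ none then q else (none : Option String))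
    = (if p ≠ none then p else q) := by
  rcases p with _ | a <;> rcases q with _ | b <;> simp

lemma pvGetDTail (run l' : List (Option String)) (x y : Option String) :
    (x :: (run ++ y :: l')).getD (run.length + 1) none = y := by
  simp only [List.getD, List.getElem?_cons_succ]
  rw [List.getElem?_append_right (by omega)]
  simp

lemma pvWriteFold (repl : Option String) : ∀ (mid pre rest : List (Option String)),
    (PySem.List.pyRange (pre.length : Int) ((pre.length : Int) + (mid.length : Int)) 1).foldl
      (fun s j => PySem.List.pySetD s j repl) (pre ++ mid ++ rest)
    = pre ++ List.replicate mid.length repl ++ rest := by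
  intro mid
  induction mid with
  | nil => intro pre rest; simp [PySem.List.pyRange_one_eq_nil]
  | cons m ms ih =>
    intro pre rest
    rw [PySem.List.pyRange_one_cons (by simp), List.foldl_cons]
    have hset : PySem.List.pySetD (pre ++ m :: ms ++ rest) (pre.length : Int) repl
        = (pre ++ [repl]) ++ ms ++ rest := by
      rw [PySem.List.pySetD_natCast]
      rw [show pre ++ m :: ms ++ rest = pre ++ m :: (ms ++ rest) by simp]
      rw [List.set_append_right _ _ (by omega)]
      simp
    rw [hset]
    have h2 := ih (pre ++ [repl]) rest
    simp only [List.length_append, List.length_cons, List.length_nil, Nat.zero_add] at h2 ⊢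
    rw [show ((pre.length : Int) + 1) = ((pre.length + 1 : Nat) : Int) by push_cast; ring,
        show ((pre.length : Int) + ((ms.length + 1 : Nat) : Int)) = ((pre.length + 1 : Nat) : Int) + (ms.length : Int) by push_cast; ring]
    rw [h2]
    simp [List.replicate_succ]

lemma pvGuardFalse (min_run_frames : Int) (x : Option String) (run out rest : List (Option String))
    (hrest : ∀ y l', rest = y :: l' → y ≠ x) :
    ¬ (((out.length : Int) + (run.length : Int) + 1) < PySem.List.len (out ++ x :: (run ++ rest)) ∧
      PySem.List.pyGetD (out ++ x :: (run ++ rest)) ((out.length : Int) + (run.length : Int) + 1) none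
      = PySem.List.pyGetD (out ++ x :: (run ++ rest)) ((out.length : Int)) none) := by
  cases rest with
  | nil =>
    rintro ⟨hlt, -⟩
    rw [PySem.List.len_eq] at hlt
    simp at hlt
    omega
  | cons y l' =>
    rintro ⟨-, heq⟩
    have hy : PySem.List.pyGetD (out ++ x :: (run ++ y :: l')) ((out.length : Int) + (run.length : Int) + 1) none = y := by
      rw [show ((out.length : Int) + (run.length : Int) + 1) = ((out.length + (run.length + 1) : Nat) : Int) by push_cast; ring,
          PySem.List.pyGetD_natCast, pvGetDAppendRight, pvGetDTail]
    have hx : PySem.List.pyGetD (out ++ x :: (run ++ y :: l')) ((out.length : Int)) none = x := by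
      rw [PySem.List.pyGetD_natCast]
      simpa using pvGetDAppendRight out (x :: (run ++ y :: l')) 0 none
    rw [hy, hx] at heq
    exact hrest y l' rfl heq

lemma pvPrevv (prev : Option String) (out t : List (Option String))
    (hprev : out.getLast?.getD none = prev) :
    (if ((out.length : Int)) > 0 then
      PySem.List.pyGetD (out ++ t) (((out.length : Int)) - 1) none else none) = prev := by
  cases out with
  | nil => simpa using hprev
  | cons o os =>
    rw [if_pos (by simp), pvLastIdx _ _ (by simp), hprev]

lemma pvNextv (x : Option String) (run out rest : List (Option String)) :
    (if ((out.length : Int) + (run.length : Int) + 1) < PySem.List.len (out ++ x :: (run ++ rest))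
      then PySem.List.pyGetD (out ++ x :: (run ++ rest)) ((out.length : Int) + (run.length : Int) + 1) none
      else none) = pvHeadN rest := by
  cases rest with
  | nil =>
    rw [if_neg]
    · simp [pvHeadN]
    rw [PySem.List.len_eq]
    simp
    omega
  | cons y l' =>
    rw [if_pos (by rw [PySem.List.len_eq]; simp; omega)]
    rw [show ((out.length : Int) + (run.length : Int) + 1) = ((out.length + (run.length + 1) : Nat) : Int) by push_cast; ring,
        PySem.List.pyGetD_natCast, pvGetDAppendRight, pvGetDTail]
    rfl

lemma pvStepProcess (min_run_frames : Int) (x prev : Option String) (run out rest : List (Option String))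
    (hrun : ∀ y ∈ run, y = x) (hprev : out.getLast?.getD none = prev)
    (hrest : ∀ y l', rest = y :: l' → y ≠ x) (val : Option String)
    (hval : val = (if ((run.length : Int) + 1) < min_run_frames then
        (if (if prev ≠ none then prev else pvHeadN rest) ≠ none
         then (if prev ≠ none then prev else pvHeadN rest)
         else x)
      else x)) :
    pvStepA min_run_frames (out ++ x :: (run ++ rest), (out.length : Int))
        ((out.length : Int) + (run.length : Int) + 1)
    = (out ++ List.replicate (run.length + 1) val ++ rest, (out.length : Int) + (run.length : Int) + 1) := by
  have hxr : x :: run = List.replicate (run.length + 1) x := by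
    rw [List.replicate_succ]
    congr 1
    exact List.eq_replicate_of_mem hrun
  simp only [pvStepA]
  rw [if_neg (pvGuardFalse min_run_frames x run out rest hrest)]
  simp only [pvPrevv prev out _ hprev, pvNextv x run out rest]
  by_cases hm : ((out.length : Int) + (run.length : Int) + 1) - ((out.length : Int)) < min_run_frames
  · rw [if_pos hm]
    have hm' : ((run.length : Int) + 1) < min_run_frames := by omega
    rw [hval, if_pos hm', pvCollapse]
    by_cases hrepl : (if prev ≠ none then prev else pvHeadN rest) ≠ none
    · rw [if_pos hrepl, if_pos hrepl]
      have hw := pvWriteFold (if prev ≠ none then prev else pvHeadN rest) (x :: run) out rest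
      simp only [List.length_cons] at hw
      rw [show ((out.length : Int) + ((run.length + 1 : Nat) : Int)) = (out.length : Int) + (run.length : Int) + 1 by push_cast; ring] at hw
      rw [show out ++ x :: (run ++ rest) = out ++ (x :: run) ++ rest by simp, hw]
    · rw [if_neg hrepl, if_neg hrepl]
      rw [show out ++ x :: (run ++ rest) = out ++ (x :: run) ++ rest by simp, hxr]
  · rw [if_neg hm]
    have hm' : ¬ (((run.length : Int) + 1) < min_run_frames) := by omega
    rw [hval, if_neg hm']
    rw [show out ++ x :: (run ++ rest) = out ++ (x :: run) ++ rest by simp, hxr]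

lemma pvLastRepl (out : List (Option String)) (k : Nat) (v : Option String) :
    (out ++ List.replicate (k + 1) v).getLast?.getD none = v := by
  rw [List.getLast?_append]
  rw [show List.replicate (k+1) v = List.replicate k v ++ [v] by rw [← List.replicate_succ']]
  simp

lemma pvPassSplit (min_run_frames : Int) : ∀ (n : Nat) (suf : List (Option String)), suf.length ≤ n →
    ∀ (out : List (Option String)) (prev : Option String),
    out.getLast?.getD none = prev →
    (PySem.List.pyRange ((out.length : Int) + 1) ((out.length : Int) + (suf.length : Int) + 1) 1).foldl
      (pvStepA min_run_frames) (out ++ suf, (out.length : Int))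
    = (out ++ pvSmoothPass min_run_frames prev suf, (out.length : Int) + (suf.length : Int)) := by
  intro n
  induction n with
  | zero =>
    intro suf hn out prev _
    match suf, hn with
    | [], _ => simp [PySem.List.pyRange_one_eq_nil, pvSmoothPass]
  | succ n ih =>
    intro suf hn out prev hprev
    match suf with
    | [] => simp [PySem.List.pyRange_one_eq_nil, pvSmoothPass]
    | x :: xs =>
      have hxs : xs = xs.takeWhile (fun y => y == x) ++ xs.dropWhile (fun y => y == x) :=
        (List.takeWhile_append_dropWhile).symm
      set run := xs.takeWhile (fun y => y == x) with hrundef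
      set rest := xs.dropWhile (fun y => y == x) with hrestdef
      have hrun : ∀ y ∈ run, y = x := by
        intro y hy
        have := List.mem_takeWhile_imp hy
        simpa using this
      have hrest : ∀ y l', rest = y :: l' → y ≠ x := by
        intro y l' he
        have hne : List.dropWhile (fun y => y == x) xs ≠ [] := by rw [← hrestdef, he]; simp
        have h1 := List.head_dropWhile_not (fun y => y == x) (l := xs) hne
        have h3 : (List.dropWhile (fun y => y == x) xs).head? = some y := by rw [← hrestdef, he]; rfl
        have h4 := List.head?_eq_some_head (l := List.dropWhile (fun y => y == x) xs) hne
        rw [h3] at h4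
        rw [← Option.some_inj.mp h4] at h1
        simpa using h1
      have hlsuf : (x :: xs).length = run.length + 1 + rest.length := by
        have h0 : xs.length = run.length + rest.length := by rw [hxs, List.length_append]
        simp [List.length_cons, h0]
        omega
      set val := (if ((run.length : Int) + 1) < min_run_frames then
          (if (if prev ≠ none then prev else pvHeadN rest) ≠ none
           then (if prev ≠ none then prev else pvHeadN rest)
           else x)
        else x) with hvaldef
      have hsplit : PySem.List.pyRange ((out.length : Int) + 1) ((out.length : Int) + ((x :: xs).length : Int) + 1) 1
          = PySem.List.pyRange ((out.length : Int) + 1) ((out.length : Int) + (run.length : Int) + 1) 1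
            ++ ((out.length : Int) + (run.length : Int) + 1)
              :: PySem.List.pyRange ((out.length : Int) + (run.length : Int) + 1 + 1) ((out.length : Int) + ((x :: xs).length : Int) + 1) 1 := by
        have e1 := PySem.List.pyRange_one_append ((out.length : Int) + 1) ((out.length : Int) + (run.length : Int) + 1)
            ((out.length : Int) + ((x :: xs).length : Int) + 1) (by omega) (by rw [hlsuf]; push_cast; omega)
        have e2 := PySem.List.pyRange_one_cons (a := (out.length : Int) + (run.length : Int) + 1)
            (b := (out.length : Int) + ((x :: xs).length : Int) + 1) (by rw [hlsuf]; push_cast; omega)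
        rw [e1, e2]
      have hstable : out ++ x :: xs = out ++ x :: (run ++ rest) := by rw [← hxs]
      rw [hstable, hsplit, List.foldl_append, pvSkipFold min_run_frames x run out rest hrun, List.foldl_cons,
          pvStepProcess min_run_frames x prev run out rest hrun hprev hrest val hvaldef]
      have ihr := ih rest (by omega) (out ++ List.replicate (run.length + 1) val) val (pvLastRepl out run.length val)
      simp only [List.length_append, List.length_replicate] at ihr
      rw [show ((out.length : Int) + (run.length : Int) + 1 + 1) = (((out.length + (run.length + 1) : Nat) : Int) + 1) by push_cast; ring,
          show ((out.length : Int) + (((x :: xs).length : Nat) : Int) + 1) = (((out.length + (run.length + 1) : Nat) : Int) + (rest.length : Int) + 1) by rw [hlsuf]; push_cast; ring,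
          show ((out.length : Int) + (run.length : Int) + 1) = ((out.length + (run.length + 1) : Nat) : Int) by push_cast; ring,
          ihr]
      rw [show pvSmoothPass min_run_frames prev (x :: xs)
            = List.replicate (run.length + 1) val ++ pvSmoothPass min_run_frames val rest by
          rw [pvSmoothPass]]
      simp only [Prod.mk.injEq]
      refine ⟨by simp [List.append_assoc], by rw [hlsuf]; push_cast; ring⟩

lemma pvPassA_eq (min_run_frames : Int) (s : List (Option String)) :
    pvPassA min_run_frames s = pvSmoothPass min_run_frames none s := by
  have h := pvPassSplit min_run_frames s.length s le_rfl [] none (by simp)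
  simp only [List.nil_append, List.length_nil, Nat.cast_zero, zero_add] at h
  simp [pvPassA, PySem.List.len_eq, h]

-- ===== lemmas about the B-side RLE pipeline =====

-- counts are positive / adjacent values distinct
def pvWF (r : List (Option String × Nat)) : Prop :=
  (∀ p ∈ r, 1 ≤ p.2) ∧ r.IsChain (fun p q => p.1 ≠ q.1)

lemma pvReplicate_takeWhile (x : Option String) (xs : List (Option String)) :
    x :: xs.takeWhile (fun y => y == x) = List.replicate ((xs.takeWhile (fun y => y == x)).length + 1) x := by
  rw [List.replicate_succ]
  congr 1
  apply List.eq_replicate_of_mem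
  intro y hy
  have := List.mem_takeWhile_imp hy
  simpa using this

lemma pvDecode_encode : ∀ (n : Nat) (l : List (Option String)), l.length ≤ n →
    pvDecode (pvEncode l) = l := by
  intro n
  induction n with
  | zero =>
    intro l hn
    match l, hn with
    | [], _ => simp [pvEncode, pvDecode]
  | succ n ih =>
    intro l hn
    match l with
    | [] => simp [pvEncode, pvDecode]
    | x :: xs =>
      rw [pvEncode]
      simp only [pvDecode, List.flatMap_cons] at *
      rw [ih _ (by simpa using Nat.le_trans (Nat.succ_le_succ (List.length_dropWhile_le _ _)) hn)]
      rw [← pvReplicate_takeWhile]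
      simp [List.takeWhile_append_dropWhile]

lemma pvEncode_headval (l : List (Option String)) :
    (pvEncode l).head?.map Prod.fst = l.head? := by
  cases l with
  | nil => simp [pvEncode]
  | cons x xs => rw [pvEncode]; rfl

lemma pvEncode_counts : ∀ (n : Nat) (l : List (Option String)), l.length ≤ n →
    ∀ p ∈ pvEncode l, 1 ≤ p.2 := by
  intro n
  induction n with
  | zero =>
    intro l hn
    match l, hn with
    | [], _ => intro p hp; simp [pvEncode] at hp
  | succ n ih =>
    intro l hn
    match l with
    | [] => intro p hp; simp [pvEncode] at hp
    | x :: xs =>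
      rw [pvEncode]
      intro p hp
      rcases List.mem_cons.mp hp with rfl | hp'
      · simp
      · exact ih _ (by simpa using Nat.le_trans (Nat.succ_le_succ (List.length_dropWhile_le (fun y => y == x) xs)) hn) p hp'

lemma pvHeadNe (x : Option String) (xs : List (Option String)) :
    ∀ b ∈ (xs.dropWhile (fun y => y == x)).head?, ¬ b = x := by
  intro b hb
  have hne : xs.dropWhile (fun y => y == x) ≠ [] := by
    intro he; rw [he] at hb; simp at hb
  have h1 := List.head_dropWhile_not (fun y => y == x) (l := xs) hne
  have h4 := List.head?_eq_some_head (l := xs.dropWhile (fun y => y == x)) hne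
  rw [Option.mem_def] at hb
  rw [hb] at h4
  rw [← Option.some_inj.mp h4] at h1
  simpa using h1

lemma pvEncode_chain : ∀ (n : Nat) (l : List (Option String)), l.length ≤ n →
    (pvEncode l).IsChain (fun p q => p.1 ≠ q.1) := by
  intro n
  induction n with
  | zero =>
    intro l hn
    match l, hn with
    | [], _ => simp [pvEncode]
  | succ n ih =>
    intro l hn
    match l with
    | [] => simp [pvEncode]
    | x :: xs =>
      rw [pvEncode, List.isChain_cons]
      constructor
      · intro q hq
        have h1 : q.1 ∈ ((pvEncode (xs.dropWhile (fun y => y == x))).head?.map Prod.fst) := by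
          rw [Option.mem_def] at hq ⊢
          simp [hq]
        rw [pvEncode_headval] at h1
        intro he
        exact pvHeadNe x xs q.1 h1 (by rw [← he])
      · exact ih _ (by simpa using Nat.le_trans (Nat.succ_le_succ (List.length_dropWhile_le _ _)) hn)

lemma pvMerge_headval (r : List (Option String × Nat)) :
    (pvMerge r).head?.map Prod.fst = r.head?.map Prod.fst := by
  cases r with
  | nil => simp [pvMerge]
  | cons p rest =>
    obtain ⟨v, c⟩ := p
    rw [pvMerge]
    rfl

lemma pvPairHeadNe (v : Option String) (rest : List (Option String × Nat)) :
    ∀ q ∈ (rest.dropWhile (fun p => p.1 == v)).head?, ¬ q.1 = v := by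
  intro q hq
  have hne : rest.dropWhile (fun p => p.1 == v) ≠ [] := by
    intro he; rw [he] at hq; simp at hq
  have h1 := List.head_dropWhile_not (fun p => p.1 == v) (l := rest) hne
  have h4 := List.head?_eq_some_head (l := rest.dropWhile (fun p => p.1 == v)) hne
  rw [Option.mem_def] at hq
  rw [hq] at h4
  rw [← Option.some_inj.mp h4] at h1
  simpa using h1

lemma pvMerge_chain : ∀ (n : Nat) (r : List (Option String × Nat)), r.length ≤ n →
    (pvMerge r).IsChain (fun p q => p.1 ≠ q.1) := by
  intro n
  induction n with
  | zero =>
    intro r hn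
    match r, hn with
    | [], _ => simp [pvMerge]
  | succ n ih =>
    intro r hn
    match r with
    | [] => simp [pvMerge]
    | (v, c) :: rest =>
      rw [pvMerge, List.isChain_cons]
      constructor
      · intro q hq
        have h1 : q.1 ∈ ((pvMerge (rest.dropWhile (fun p => p.1 == v))).head?.map Prod.fst) := by
          rw [Option.mem_def] at hq ⊢
          simp [hq]
        rw [pvMerge_headval] at h1
        rcases Option.map_eq_some_iff.mp h1 with ⟨q', hq', hq1⟩
        intro he
        exact pvPairHeadNe v rest q' hq' (by rw [hq1, ← he])
      · exact ih _ (by simpa using Nat.le_trans (Nat.succ_le_succ (List.length_dropWhile_le _ _)) hn)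

lemma pvMerge_counts : ∀ (n : Nat) (r : List (Option String × Nat)), r.length ≤ n →
    (∀ p ∈ r, 1 ≤ p.2) → ∀ p ∈ pvMerge r, 1 ≤ p.2 := by
  intro n
  induction n with
  | zero =>
    intro r hn
    match r, hn with
    | [], _ => intro _ p hp; simp [pvMerge] at hp
  | succ n ih =>
    intro r hn hc
    match r with
    | [] => intro p hp; simp [pvMerge] at hp
    | (v, c) :: rest =>
      rw [pvMerge]
      intro p hp
      rcases List.mem_cons.mp hp with rfl | hp'
      · have : 1 ≤ c := hc (v, c) (by simp)
        simp; omega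
      · exact ih _ (by simpa using Nat.le_trans (Nat.succ_le_succ (List.length_dropWhile_le (fun p => p.1 == v) rest)) hn)
          (fun q hq => hc q (List.mem_cons_of_mem _ ((List.dropWhile_sublist (fun p => p.1 == v)).subset hq))) p hp'

lemma pvDecode_const (v : Option String) : ∀ (tw : List (Option String × Nat)),
    (∀ p ∈ tw, p.1 = v) → pvDecode tw = List.replicate ((tw.map Prod.snd).sum) v := by
  intro tw
  induction tw with
  | nil => intro _; rfl
  | cons p rest ih =>
    intro h
    have hp : p.1 = v := h p (by simp)
    simp only [pvDecode, List.flatMap_cons, List.map_cons, List.sum_cons] at *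
    rw [ih (fun q hq => h q (by simp [hq])), hp, List.replicate_add]

lemma pvMerge_decode : ∀ (n : Nat) (r : List (Option String × Nat)), r.length ≤ n →
    pvDecode (pvMerge r) = pvDecode r := by
  intro n
  induction n with
  | zero =>
    intro r hn
    match r, hn with
    | [], _ => simp [pvMerge]
  | succ n ih =>
    intro r hn
    match r with
    | [] => simp [pvMerge]
    | (v, c) :: rest =>
      rw [pvMerge]
      have htw : ∀ p ∈ rest.takeWhile (fun p => p.1 == v), p.1 = v := by
        intro p hp
        have := List.mem_takeWhile_imp hp
        simpa using this
      have hsplit : rest = rest.takeWhile (fun p => p.1 == v) ++ rest.dropWhile (fun p => p.1 == v) :=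
        (List.takeWhile_append_dropWhile).symm
      simp only [pvDecode, List.flatMap_cons] at *
      rw [ih _ (by simpa using Nat.le_trans (Nat.succ_le_succ (List.length_dropWhile_le _ _)) hn)]
      conv_rhs => rw [hsplit]
      rw [List.flatMap_append]
      have hc := pvDecode_const v (rest.takeWhile (fun p => p.1 == v)) htw
      simp only [pvDecode] at hc
      rw [hc, List.replicate_add, List.append_assoc]

lemma pvTakeWhile_replicate (v : Option String) (k : Nat) : ∀ (t : List (Option String)),
    (∀ y ∈ t.head?, y ≠ v) →
    (List.replicate k v ++ t).takeWhile (fun y => y == v) = List.replicate k v ∧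
    (List.replicate k v ++ t).dropWhile (fun y => y == v) = t := by
  induction k with
  | zero =>
    intro t ht
    simp only [List.replicate_zero, List.nil_append]
    cases t with
    | nil => simp
    | cons y t' =>
      have : ¬ (y == v) = true := by
        simpa using ht y (by simp)
      constructor
      · simp [List.takeWhile_cons, this]
      · simp [List.dropWhile_cons, this]
  | succ k ih =>
    intro t ht
    simp only [List.replicate_succ, List.cons_append]
    rw [List.takeWhile_cons_of_pos (by simp), List.dropWhile_cons_of_pos (by simp)]
    exact ⟨by rw [(ih t ht).1], (ih t ht).2⟩

lemma pvDecode_head (rest : List (Option String × Nat)) (hc : ∀ p ∈ rest, 1 ≤ p.2) :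
    ∀ y ∈ (pvDecode rest).head?, some y = rest.head?.map Prod.fst := by
  cases rest with
  | nil => intro y hy; simp [pvDecode] at hy
  | cons p rest' =>
    intro y hy
    have h1 : 1 ≤ p.2 := hc p (by simp)
    obtain ⟨k, hk⟩ : ∃ k, p.2 = k + 1 := ⟨p.2 - 1, by omega⟩
    simp only [pvDecode, List.flatMap_cons, hk, List.replicate_succ, List.cons_append,
      List.head?_cons, Option.mem_def, Option.some_inj] at hy
    simp [← hy]

lemma pvSmooth_decode (min_run_frames : Int) : ∀ (r : List (Option String × Nat)),
    pvWF r → ∀ prev,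
    pvDecode (pvSmoothR min_run_frames prev r) = pvSmoothPass min_run_frames prev (pvDecode r) := by
  intro r
  induction r with
  | nil => intro _ prev; simp [pvSmoothR, pvSmoothPass, pvDecode]
  | cons p rest ih =>
    rintro ⟨hc, hch⟩ prev
    obtain ⟨v, c⟩ := p
    have h1 : 1 ≤ c := hc (v, c) (by simp)
    obtain ⟨k, hk⟩ : ∃ k, c = k + 1 := ⟨c - 1, by omega⟩
    have hcrest : ∀ p ∈ rest, 1 ≤ p.2 := fun q hq => hc q (by simp [hq])
    have hchrest : rest.IsChain (fun p q => p.1 ≠ q.1) := (List.isChain_cons.mp hch).2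
    have hhead : ∀ y ∈ (pvDecode rest).head?, y ≠ v := by
      intro y hy
      have h2 := pvDecode_head rest hcrest y hy
      rcases Option.map_eq_some_iff.mp h2.symm with ⟨q, hq, hq1⟩
      have hne := (List.isChain_cons.mp hch).1 q (by rw [Option.mem_def]; exact hq)
      exact fun he => hne (by simp only []; rw [hq1, he])
    have htw := pvTakeWhile_replicate v k (pvDecode rest) hhead
    rw [pvSmoothR]
    simp only [pvDecode, List.flatMap_cons] at *
    rw [hk]
    rw [show List.replicate (k+1) v = v :: List.replicate k v by rw [List.replicate_succ]]
    rw [show (v :: List.replicate k v ++ (rest.flatMap fun p => List.replicate p.2 p.1))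
          = v :: (List.replicate k v ++ (rest.flatMap fun p => List.replicate p.2 p.1)) by simp]
    rw [pvSmoothPass]
    simp only [htw.1, htw.2, List.length_replicate]
    have hnxt : pvHeadN (rest.flatMap fun p => List.replicate p.2 p.1) = pvNextVal rest := by
      cases rest with
      | nil => rfl
      | cons q rest' =>
        have h1 : 1 ≤ q.2 := hcrest q (by simp)
        obtain ⟨k', hk'⟩ : ∃ k', q.2 = k' + 1 := ⟨q.2 - 1, by omega⟩
        simp only [List.flatMap_cons, hk', List.replicate_succ, List.cons_append]
        obtain ⟨w, c'⟩ := q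
        rfl
    have hcast : ((k : Int) + 1) = (((k + 1 : Nat)) : Int) := by push_cast; ring
    rw [hnxt, hcast]
    set val := (if (((k + 1 : Nat) : Int)) < min_run_frames then
        (if (if prev ≠ none then prev else pvNextVal rest) ≠ none
         then (if prev ≠ none then prev else pvNextVal rest)
         else v)
      else v) with hvaldef
    have ihr := ih ⟨hcrest, hchrest⟩ val
    simp only [pvDecode] at ihr
    rw [ihr]

lemma pvPassB_decode (min_run_frames : Int) (r : List (Option String × Nat)) (hwf : pvWF r) :
    pvDecode (pvMerge (pvSmoothR min_run_frames none r))
      = pvSmoothPass min_run_frames none (pvDecode r) := by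
  rw [pvMerge_decode _ _ le_rfl, pvSmooth_decode min_run_frames r hwf none]

lemma pvSmoothR_counts (min_run_frames : Int) : ∀ (prev : Option String) (r : List (Option String × Nat)),
    (∀ p ∈ r, 1 ≤ p.2) → ∀ p ∈ pvSmoothR min_run_frames prev r, 1 ≤ p.2 := by
  intro prev r
  induction r generalizing prev with
  | nil => intro _ p hp; simp [pvSmoothR] at hp
  | cons q rest ih =>
    intro hc
    obtain ⟨v, c⟩ := q
    rw [pvSmoothR]
    intro p hp
    rcases List.mem_cons.mp hp with rfl | hp'
    · exact hc (v, c) (by simp)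
    · exact ih _ (fun q' hq' => hc q' (by simp [hq'])) p hp'

lemma pvMergeSmooth_WF (min_run_frames : Int) (r : List (Option String × Nat))
    (hc : ∀ p ∈ r, 1 ≤ p.2) :
    pvWF (pvMerge (pvSmoothR min_run_frames none r)) :=
  ⟨pvMerge_counts _ _ le_rfl (pvSmoothR_counts min_run_frames none r hc),
   pvMerge_chain _ _ le_rfl⟩

-- ===== VERDICT (by name: the statement is the Claim_ definition above) =====
theorem stabilize_label_sequence_py_spec : Claim_equal_stabilize_label_sequence_py := by
  intro labels min_run_frames _
  unfold Spec_stabilize_label_sequence_py stabilize_label_sequence_py stabilize_label_sequence_py_alt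
  by_cases h : min_run_frames ≤ 1 ∨ PySem.List.len labels ≤ 1
  · rw [if_pos h, if_pos h]
  · have hr : PySem.List.pyRange 0 2 1 = [0, 1] := by decide
    rw [if_neg h, if_neg h, hr]
    simp only [List.foldl_cons, List.foldl_nil, pvPassA_eq]
    have hwf1 : pvWF (pvEncode labels) :=
      ⟨pvEncode_counts _ _ le_rfl, pvEncode_chain _ _ le_rfl⟩
    rw [pvPassB_decode min_run_frames _
        (pvMergeSmooth_WF min_run_frames (pvEncode labels) hwf1.1)]
    rw [pvPassB_decode min_run_frames _ hwf1]
    rw [pvDecode_encode _ _ le_rfl]
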